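-- pv_equiv track=rewrite | github.com/mejukoo-svg/newTightauto | 국내_세트별_supabase.py | get_rate_for_date
-- ===== SOURCE A (Python) =====
-- FALLBACK_USD_KRW = 1450
--
-- def get_rate_for_date(rates, dk):
--     if dk in rates:
--         return rates[dk]
--     if rates:
--         sorted_keys = sorted(rates.keys())
--         prev = [k for k in sorted_keys if k <= dk]
--         if prev:
--             return rates[prev[-1]]
--         return rates[sorted_keys[0]]
--     return FALLBACK_USD_KRW
-- ===== SOURCE B (Python) =====
-- FALLBACK_USD_KRW = 1450
--
-- def get_rate_for_date(rates, dk):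
--     # One linear pass: keep the entry with the largest key <= dk and the
--     # entry with the smallest key overall (first occurrence kept on ties).
--     best_le = None
--     best_min = None
--     for k, v in rates.items():
--         if k <= dk and (best_le is None or best_le[0] < k):
--             best_le = (k, v)
--         if best_min is None or k < best_min[0]:
--             best_min = (k, v)
--     if best_le is not None:
--         return best_le[1]
--     if best_min is not None:
--         return best_min[1]
--     return FALLBACK_USD_KRW
-- ===== Notes on version B (the rewrite author's own statement) =====
-- stated objective: faster
-- what changed: Replaces the membership test plus sort-of-all-keys, filter and last-element pick by a single linear pass over the dict items that tracks the entry with the largest key <= dk and the entry with the smallest key overall.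
import Mathlib
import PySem

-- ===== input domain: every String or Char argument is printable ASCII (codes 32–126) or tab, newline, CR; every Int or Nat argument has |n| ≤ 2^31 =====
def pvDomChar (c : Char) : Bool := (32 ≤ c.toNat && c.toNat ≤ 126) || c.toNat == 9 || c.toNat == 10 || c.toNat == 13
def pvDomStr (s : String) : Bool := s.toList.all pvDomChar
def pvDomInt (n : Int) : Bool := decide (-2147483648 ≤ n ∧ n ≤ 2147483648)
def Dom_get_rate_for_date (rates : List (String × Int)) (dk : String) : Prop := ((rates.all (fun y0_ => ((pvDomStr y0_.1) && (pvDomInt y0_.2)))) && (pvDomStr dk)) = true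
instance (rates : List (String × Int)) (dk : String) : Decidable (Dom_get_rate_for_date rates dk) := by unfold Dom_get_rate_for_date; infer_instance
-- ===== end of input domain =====

-- B replaces A's sort-then-filter scan by one linear pass keeping the entry with the
-- largest key ≤ dk and the entry with the smallest key overall (no sort; objective: faster by algorithm, timing advisory).

-- ===== PORT A =====
-- Literal port of A; the '.getD 0' defaults on lookups are unreachable (keys come from the dict itself).
def get_rate_for_date (rates : List (String × Int)) (dk : String) : Int :=
  let d : PySem.Dict String Int := ⟨rates⟩
  if d.contains dk then (d.get? dk).getD 0
  else if !rates.isEmpty then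
    let sorted_keys := PySem.List.sorted d.keys (fun k => k)
    let prev := sorted_keys.filter (fun k => decide (k ≤ dk))
    if !prev.isEmpty then (d.get? (prev.getLastD "")).getD 0
    else (d.get? (sorted_keys.headD "")).getD 0
  else 1450

-- ===== PORT B =====
-- 'if k <= dk and (best_le is None or best_le[0] < k): best_le = (k, v)'
def altUpdLe (dk : String) (s : Option (String × Int)) (kv : String × Int) : Option (String × Int) :=
  match s with
  | none => if kv.1 ≤ dk then some kv else none
  | some b => if kv.1 ≤ dk ∧ b.1 < kv.1 then some kv else some b

-- 'if best_min is None or k < best_min[0]: best_min = (k, v)'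
def altUpdMin (s : Option (String × Int)) (kv : String × Int) : Option (String × Int) :=
  match s with
  | none => some kv
  | some m => if kv.1 < m.1 then some kv else some m

def get_rate_for_date_alt (rates : List (String × Int)) (dk : String) : Int :=
  let r := rates.foldl (fun s kv => (altUpdLe dk s.1 kv, altUpdMin s.2 kv)) (none, none)
  match r.1, r.2 with
  | some b, _ => b.2
  | none, some m => m.2
  | none, none => 1450

-- ===== PRECONDITION & SPEC =====
def Spec_get_rate_for_date (rates : List (String × Int)) (dk : String) (out : Int) : Prop := out = get_rate_for_date_alt rates dk
instance (rates : List (String × Int)) (dk : String) (out : Int) : Decidable (Spec_get_rate_for_date rates dk out) := by unfold Spec_get_rate_for_date; infer_instance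

-- ===== CLAIM (what is proved, stated in full; the proofs are below) =====
def Claim_equal_get_rate_for_date : Prop := ∀ (rates : List (String × Int)) (dk : String), Dom_get_rate_for_date rates dk → Spec_get_rate_for_date rates dk (get_rate_for_date rates dk)

-- ===== LEMMAS AND PROOFS =====

-- the max-update step without the '≤ dk' test
def updMaxBy (s : Option (String × Int)) (kv : String × Int) : Option (String × Int) :=
  match s with
  | none => some kv
  | some b => if b.1 < kv.1 then some kv else some b

theorem altUpdLe_eq (dk : String) (s : Option (String × Int)) (kv : String × Int) :
    altUpdLe dk s kv = if decide (kv.1 ≤ dk) = true then updMaxBy s kv else s := by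
  cases s
  · simp only [altUpdLe, updMaxBy, decide_eq_true_eq]
  · simp only [altUpdLe, updMaxBy, decide_eq_true_eq]
    split_ifs <;> simp_all

theorem foldl_updMaxBy_some (l : List (String × Int)) (b : String × Int) :
    ∃ c, l.foldl updMaxBy (some b) = some c ∧ b.1 ≤ c.1 ∧ (∀ q ∈ l, q.1 ≤ c.1) ∧
      (c = b ∨ (b.1 < c.1 ∧ l.find? (fun q => q.1 == c.1) = some c)) := by
  induction l generalizing b with
  | nil => exact ⟨b, rfl, le_refl _, by simp, Or.inl rfl⟩
  | cons x t ih =>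
    by_cases hx : b.1 < x.1
    · obtain ⟨c, hfold, hle, hbnd, hdisj⟩ := ih x
      refine ⟨c, ?_, le_of_lt (lt_of_lt_of_le hx hle), ?_, ?_⟩
      · simpa [updMaxBy, hx] using hfold
      · intro q hq
        rcases List.mem_cons.mp hq with rfl | hq'
        · exact hle
        · exact hbnd q hq'
      · right
        rcases hdisj with rfl | ⟨hlt, hfind⟩
        · exact ⟨hx, by simp [List.find?]⟩
        · refine ⟨lt_trans hx hlt, ?_⟩
          have hneq : (x.1 == c.1) = false := by simp [ne_of_lt hlt]
          simp [List.find?, hneq, hfind]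
    · obtain ⟨c, hfold, hle, hbnd, hdisj⟩ := ih b
      refine ⟨c, ?_, hle, ?_, ?_⟩
      · simpa [updMaxBy, hx] using hfold
      · intro q hq
        rcases List.mem_cons.mp hq with rfl | hq'
        · exact le_trans (le_of_not_gt hx) hle
        · exact hbnd q hq'
      · rcases hdisj with rfl | ⟨hlt, hfind⟩
        · exact Or.inl rfl
        · right
          refine ⟨hlt, ?_⟩
          have hneq : (x.1 == c.1) = false := by
            simp [ne_of_lt (lt_of_le_of_lt (le_of_not_gt hx) hlt)]
          simp [List.find?, hneq, hfind]

theorem foldl_updMaxBy_none (l : List (String × Int)) (hne : l ≠ []) :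
    ∃ c, l.foldl updMaxBy none = some c ∧ (∀ q ∈ l, q.1 ≤ c.1) ∧
      l.find? (fun q => q.1 == c.1) = some c := by
  cases l with
  | nil => exact absurd rfl hne
  | cons x t =>
    obtain ⟨c, hfold, hle, hbnd, hdisj⟩ := foldl_updMaxBy_some t x
    refine ⟨c, by simpa [updMaxBy] using hfold, ?_, ?_⟩
    · intro q hq
      rcases List.mem_cons.mp hq with rfl | hq'
      · exact hle
      · exact hbnd q hq'
    · rcases hdisj with rfl | ⟨hlt, hfind⟩
      · simp [List.find?]
      · have hneq : (x.1 == c.1) = false := by simp [ne_of_lt hlt]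
        simp [List.find?, hneq, hfind]

theorem foldl_updMin_some (l : List (String × Int)) (b : String × Int) :
    ∃ c, l.foldl altUpdMin (some b) = some c ∧ c.1 ≤ b.1 ∧ (∀ q ∈ l, c.1 ≤ q.1) ∧
      (c = b ∨ (c.1 < b.1 ∧ l.find? (fun q => q.1 == c.1) = some c)) := by
  induction l generalizing b with
  | nil => exact ⟨b, rfl, le_refl _, by simp, Or.inl rfl⟩
  | cons x t ih =>
    by_cases hx : x.1 < b.1
    · obtain ⟨c, hfold, hle, hbnd, hdisj⟩ := ih x
      refine ⟨c, ?_, le_of_lt (lt_of_le_of_lt hle hx), ?_, ?_⟩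
      · simpa [altUpdMin, hx] using hfold
      · intro q hq
        rcases List.mem_cons.mp hq with rfl | hq'
        · exact hle
        · exact hbnd q hq'
      · right
        rcases hdisj with rfl | ⟨hlt, hfind⟩
        · exact ⟨hx, by simp [List.find?]⟩
        · refine ⟨lt_trans hlt hx, ?_⟩
          have hneq : (x.1 == c.1) = false := by simp [(ne_of_lt hlt).symm]
          simp [List.find?, hneq, hfind]
    · obtain ⟨c, hfold, hle, hbnd, hdisj⟩ := ih b
      refine ⟨c, ?_, hle, ?_, ?_⟩
      · simpa [altUpdMin, hx] using hfold
      · intro q hq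
        rcases List.mem_cons.mp hq with rfl | hq'
        · exact le_trans hle (le_of_not_gt hx)
        · exact hbnd q hq'
      · rcases hdisj with rfl | ⟨hlt, hfind⟩
        · exact Or.inl rfl
        · right
          refine ⟨hlt, ?_⟩
          have hneq : (x.1 == c.1) = false := by
            simp [(ne_of_lt (lt_of_lt_of_le hlt (le_of_not_gt hx))).symm]
          simp [List.find?, hneq, hfind]

theorem foldl_updMin_none (l : List (String × Int)) (hne : l ≠ []) :
    ∃ c, l.foldl altUpdMin none = some c ∧ (∀ q ∈ l, c.1 ≤ q.1) ∧
      l.find? (fun q => q.1 == c.1) = some c := by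
  cases l with
  | nil => exact absurd rfl hne
  | cons x t =>
    obtain ⟨c, hfold, hle, hbnd, hdisj⟩ := foldl_updMin_some t x
    refine ⟨c, by simpa [altUpdMin] using hfold, ?_, ?_⟩
    · intro q hq
      rcases List.mem_cons.mp hq with rfl | hq'
      · exact hle
      · exact hbnd q hq'
    · rcases hdisj with rfl | ⟨hlt, hfind⟩
      · simp [List.find?]
      · have hneq : (x.1 == c.1) = false := by simp [(ne_of_lt hlt).symm]
        simp [List.find?, hneq, hfind]

-- find? for a key ≤ dk passes through the '≤ dk' filter unchanged
theorem find?_filter_le (rates : List (String × Int)) (dk k : String) (hk : k ≤ dk) :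
    (rates.filter (fun kv => decide (kv.1 ≤ dk))).find? (fun q => q.1 == k)
      = rates.find? (fun q => q.1 == k) := by
  rw [List.find?_filter]
  have hfun : (fun (a : String × Int) => decide ((decide (a.1 ≤ dk)) = true ∧ (a.1 == k) = true))
      = fun (q : String × Int) => q.1 == k := by
    funext a
    by_cases h : a.1 = k <;> simp [h, hk]
  rw [hfun]

-- a Pairwise-(≤) list is bounded by its last element
theorem pairwise_le_getLastD (l : List String) (hp : l.Pairwise (· ≤ ·)) (d : String) :
    ∀ x ∈ l, x ≤ l.getLastD d := by
  induction l with
  | nil => simp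
  | cons a t ih =>
    intro x hx
    cases t with
    | nil => simp at hx; simp [hx]
    | cons b u =>
      have hp' := List.pairwise_cons.mp hp
      rcases List.mem_cons.mp hx with rfl | hx'
      · calc x ≤ b := hp'.1 b (by simp)
          _ ≤ (b :: u).getLastD d := ih hp'.2 b (by simp)
      · exact ih hp'.2 x hx'

theorem getLastD_mem (l : List String) (hne : l ≠ []) (d : String) : l.getLastD d ∈ l := by
  induction l with
  | nil => exact absurd rfl hne
  | cons a t ih =>
    cases t with
    | nil => simp
    | cons b u => simpa using Or.inr (ih (by simp))

-- the head of a Pairwise-(≤) list bounds it from below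
theorem pairwise_le_headD (l : List String) (hp : l.Pairwise (· ≤ ·)) (d : String) :
    ∀ x ∈ l, l.headD d ≤ x := by
  cases l with
  | nil => simp
  | cons a t =>
    intro x hx
    rcases List.mem_cons.mp hx with rfl | hx'
    · simp
    · exact (List.pairwise_cons.mp hp).1 x hx'

-- B's fold, split into its two independent components
theorem alt_eq (rates : List (String × Int)) (dk : String) :
    get_rate_for_date_alt rates dk =
      (match (rates.filter (fun kv => decide (kv.1 ≤ dk))).foldl updMaxBy none,
             rates.foldl altUpdMin none with
       | some b, _ => b.2
       | none, some m => m.2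
       | none, none => 1450) := by
  unfold get_rate_for_date_alt
  rw [PySem.List.foldl_prod_mk (f := fun s kv => altUpdLe dk s kv) (g := fun s kv => altUpdMin s kv)]
  have h1 : rates.foldl (fun s kv => altUpdLe dk s kv) none
      = (rates.filter (fun kv => decide (kv.1 ≤ dk))).foldl updMaxBy none := by
    have h2 : rates.foldl (fun s kv => altUpdLe dk s kv) none
        = rates.foldl (fun s kv => if decide (kv.1 ≤ dk) = true then updMaxBy s kv else s) none :=
      PySem.List.foldl_congr_mem rates _ _ none (fun acc x _ => altUpdLe_eq dk acc x)
    rw [h2, PySem.List.foldl_if_eq_foldl_filter]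
  rw [h1]

-- the whole equivalence, case by case along A's branches
theorem main_eq (rates : List (String × Int)) (dk : String) :
    get_rate_for_date rates dk = get_rate_for_date_alt rates dk := by
  rw [alt_eq]
  by_cases hrates : rates = []
  · subst hrates; rfl
  · have hmemL : ∀ q, q ∈ rates.filter (fun kv => decide (kv.1 ≤ dk)) ↔ q ∈ rates ∧ q.1 ≤ dk := by
      intro q; simp
    have hpair : (PySem.List.sorted (List.map (fun x => x.1) rates) (fun k => k)).Pairwise (· ≤ ·) := by
      simpa using PySem.List.sorted_pairwise (List.map (fun x => x.1) rates) (fun k => k)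
    have hperm := PySem.List.sorted_perm (List.map (fun x => x.1) rates) (fun k => k) false
    have hmemprev : ∀ k, k ∈ (PySem.List.sorted (List.map (fun x => x.1) rates) (fun k => k)).filter (fun k => decide (k ≤ dk)) ↔ (∃ q ∈ rates, q.1 = k) ∧ k ≤ dk := by
      intro k; simp [List.mem_filter, hperm.mem_iff]
    by_cases hc : ∃ q ∈ rates, q.1 = dk
    · -- dk is a key: A returns rates[dk]; B's best_le has key dk
      obtain ⟨q, hqmem, hqk⟩ := hc
      have hqL : q ∈ rates.filter (fun kv => decide (kv.1 ≤ dk)) := (hmemL q).mpr ⟨hqmem, le_of_eq hqk⟩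
      have hLne : rates.filter (fun kv => decide (kv.1 ≤ dk)) ≠ [] := by
        intro h; rw [h] at hqL; exact absurd hqL (List.not_mem_nil)
      obtain ⟨c, hfold, hbnd, hfind⟩ := foldl_updMaxBy_none _ hLne
      have hcL := List.mem_of_find?_eq_some hfind
      have hcle : c.1 ≤ dk := ((hmemL c).mp hcL).2
      have hck : c.1 = dk := le_antisymm hcle (hqk ▸ hbnd q hqL)
      have hpred : (fun (p : String × Int) => p.1 == c.1) = (fun p => p.1 == dk) := by rw [hck]
      have hfind' : (rates.filter (fun kv => decide (kv.1 ≤ dk))).find? (fun p => p.1 == dk) = some c := by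
        rw [← hpred]; exact hfind
      have hfindrates : rates.find? (fun p => p.1 == dk) = some c := by
        rw [← find?_filter_le rates dk dk (le_refl dk)]; exact hfind'
      have hcontains : (⟨rates⟩ : PySem.Dict String Int).contains dk = true := by
        simp only [PySem.Dict.contains, List.any_eq_true]
        exact ⟨q, hqmem, by simp [hqk]⟩
      rw [hfold]
      simp only [get_rate_for_date, PySem.Dict.get?, PySem.Dict.keys]
      rw [if_pos hcontains, hfindrates]
      rfl
    · have hcontains : (⟨rates⟩ : PySem.Dict String Int).contains dk = false := by
        simp only [PySem.Dict.contains, List.any_eq_false]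
        intro p hp
        simp only [beq_iff_eq]
        exact fun h => hc ⟨p, hp, h⟩
      by_cases hprevne : (PySem.List.sorted (List.map (fun x => x.1) rates) (fun k => k)).filter (fun k => decide (k ≤ dk)) = []
      · -- no key ≤ dk: A returns the earliest key's rate; B's best_le is none, best_min has the min key
        have hLnil : rates.filter (fun kv => decide (kv.1 ≤ dk)) = [] := by
          rw [List.filter_eq_nil_iff]
          intro q hq
          simp only [decide_eq_true_eq]
          intro hle
          have : q.1 ∈ (PySem.List.sorted (List.map (fun x => x.1) rates) (fun k => k)).filter (fun k => decide (k ≤ dk)) :=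
            (hmemprev q.1).mpr ⟨⟨q, hq, rfl⟩, hle⟩
          rw [hprevne] at this; exact absurd this (List.not_mem_nil)
        obtain ⟨c, hfold, hbnd, hfind⟩ := foldl_updMin_none rates hrates
        have hcmem := List.mem_of_find?_eq_some hfind
        have hskne : PySem.List.sorted (List.map (fun x => x.1) rates) (fun k => k) ≠ [] := by
          intro h
          rw [h] at hperm
          exact hrates (by simpa using List.perm_nil.mp hperm.symm)
        have hk1mem : (PySem.List.sorted (List.map (fun x => x.1) rates) (fun k => k)).headD "" ∈ PySem.List.sorted (List.map (fun x => x.1) rates) (fun k => k) := by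
          cases h : PySem.List.sorted (List.map (fun x => x.1) rates) (fun k => k) with
          | nil => exact absurd h hskne
          | cons a t => simp
        obtain ⟨q, hq, hqk⟩ : ∃ q ∈ rates, q.1 = (PySem.List.sorted (List.map (fun x => x.1) rates) (fun k => k)).headD "" := by
          simpa using hperm.mem_iff.mp hk1mem
        have h1 : c.1 ≤ (PySem.List.sorted (List.map (fun x => x.1) rates) (fun k => k)).headD "" := hqk ▸ hbnd q hq
        have h2 : (PySem.List.sorted (List.map (fun x => x.1) rates) (fun k => k)).headD "" ≤ c.1 :=
          pairwise_le_headD _ hpair "" c.1 (hperm.mem_iff.mpr (List.mem_map_of_mem hcmem))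
        have hk1 : (PySem.List.sorted (List.map (fun x => x.1) rates) (fun k => k)).headD "" = c.1 := le_antisymm h2 h1
        have hfindrates : rates.find? (fun p => p.1 == (PySem.List.sorted (List.map (fun x => x.1) rates) (fun k => k)).headD "") = some c := by
          rw [hk1]; exact hfind
        rw [hLnil, hfold]
        simp only [get_rate_for_date, PySem.Dict.get?, PySem.Dict.keys]
        split_ifs with h1 h2 h3
        · exact absurd h1 (by simp [hcontains])
        · rw [hprevne] at h3; simp at h3
        · rw [hfindrates]; rfl
        · exact absurd h2 (by simp [hrates])
      · -- some key ≤ dk: A returns the rate at the last of them in sorted order; B's best_le is its first entry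
        have hprevpair := hpair.filter (fun k => decide (k ≤ dk))
        have hk0mem := getLastD_mem _ hprevne ""
        obtain ⟨⟨q, hq, hqk⟩, hk0le⟩ := (hmemprev _).mp hk0mem
        have hqL : q ∈ rates.filter (fun kv => decide (kv.1 ≤ dk)) := (hmemL q).mpr ⟨hq, hqk ▸ hk0le⟩
        have hLne : rates.filter (fun kv => decide (kv.1 ≤ dk)) ≠ [] := by
          intro h; rw [h] at hqL; exact absurd hqL (List.not_mem_nil)
        obtain ⟨c, hfold, hbnd, hfind⟩ := foldl_updMaxBy_none _ hLne
        have hcL := List.mem_of_find?_eq_some hfind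
        have hcle : c.1 ≤ dk := ((hmemL c).mp hcL).2
        have hcprev : c.1 ∈ (PySem.List.sorted (List.map (fun x => x.1) rates) (fun k => k)).filter (fun k => decide (k ≤ dk)) :=
          (hmemprev c.1).mpr ⟨⟨c, ((hmemL c).mp hcL).1, rfl⟩, hcle⟩
        have h1 : c.1 ≤ ((PySem.List.sorted (List.map (fun x => x.1) rates) (fun k => k)).filter (fun k => decide (k ≤ dk))).getLastD "" :=
          pairwise_le_getLastD _ hprevpair "" c.1 hcprev
        have h2 : ((PySem.List.sorted (List.map (fun x => x.1) rates) (fun k => k)).filter (fun k => decide (k ≤ dk))).getLastD "" ≤ c.1 := hqk ▸ hbnd q hqL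
        have hk0 : ((PySem.List.sorted (List.map (fun x => x.1) rates) (fun k => k)).filter (fun k => decide (k ≤ dk))).getLastD "" = c.1 := le_antisymm h2 h1
        have hfind' : (rates.filter (fun kv => decide (kv.1 ≤ dk))).find? (fun p => p.1 == ((PySem.List.sorted (List.map (fun x => x.1) rates) (fun k => k)).filter (fun k => decide (k ≤ dk))).getLastD "") = some c := by
          rw [hk0]; exact hfind
        have hfindrates : rates.find? (fun p => p.1 == ((PySem.List.sorted (List.map (fun x => x.1) rates) (fun k => k)).filter (fun k => decide (k ≤ dk))).getLastD "") = some c := by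
          rw [← find?_filter_le rates dk _ (hk0 ▸ hcle)]; exact hfind'
        rw [hfold]
        simp only [get_rate_for_date, PySem.Dict.get?, PySem.Dict.keys]
        split_ifs with h1 h2 h3
        · exact absurd h1 (by simp [hcontains])
        · rw [hfindrates]; rfl
        · simp only [Bool.not_eq_true, Bool.not_eq_false'] at h3
          exact absurd (List.isEmpty_iff.mp h3) hprevne
        · exact absurd h2 (by simp [hrates])

-- ===== VERDICT (by name: the statement is the Claim_ definition above) =====
theorem get_rate_for_date_spec : Claim_equal_get_rate_for_date := by
  intro rates dk _
  unfold Spec_get_rate_for_date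
  exact main_eq rates dk
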